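-- pv_equiv track=rewrite | github.com/G-Workman/Python-Practice | Practice-Exam2.py | q5
-- ===== SOURCE A (Python) =====
-- def q5(integer, limit):
--     '''
--     Given an integer and limit, return a list of even multiples of the
--     integer up to and including the limit. For example, if integer==3 and
--     limit==30, the returned list should be [0,6,12,18,24,30]. Note, 0 is
--     a multiple of any integer except 0 itself.
--     '''
--     nolist = []
--     newlist = []
--     x =  list(range(0,limit+1,integer))
--
--     for i in x:
--         i = int(i)
--         if i % 2 != 0:
--             nolist.append(int(str(i)))
--         else:
--             newlist.append(int(str(i)))
--     return newlist
-- ===== SOURCE B (Python) =====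
-- def q5(integer, limit):
--     # Even multiples of `integer` are exactly the multiples of `integer` when it
--     # is even, and of `2*integer` when it is odd: enumerate them directly.
--     step = integer if integer % 2 == 0 else 2 * integer
--     return list(range(0, limit + 1, step))
-- ===== Notes on version B (the rewrite author's own statement) =====
-- stated objective: simpler
-- what changed: Instead of enumerating every multiple and filtering out the odd ones per element, B computes the correct stride (integer if even, else 2*integer) and returns range(0, limit+1, step) directly, with no filtering loop and no str/int round-trip.
import Mathlib
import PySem

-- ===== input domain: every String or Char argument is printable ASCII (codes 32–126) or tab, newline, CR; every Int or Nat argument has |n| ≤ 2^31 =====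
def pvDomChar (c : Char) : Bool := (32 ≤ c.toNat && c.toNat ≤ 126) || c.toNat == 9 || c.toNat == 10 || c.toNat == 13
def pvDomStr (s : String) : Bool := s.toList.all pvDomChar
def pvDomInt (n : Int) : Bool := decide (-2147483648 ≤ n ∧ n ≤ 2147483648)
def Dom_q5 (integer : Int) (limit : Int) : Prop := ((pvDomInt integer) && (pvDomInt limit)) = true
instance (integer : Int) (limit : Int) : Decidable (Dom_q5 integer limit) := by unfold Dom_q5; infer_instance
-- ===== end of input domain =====

-- B replaces A's enumerate-all-multiples-and-filter loop by a direct range with the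
-- right stride (integer if even, else 2*integer); objective: simpler.

-- ===== PORT A =====
-- loop body: i = int(i) is the identity on ints, and int(str(i)) = i for every int
-- (exact: str then int round-trips every integer), so both appends append i itself.
def q5Step (acc : List Int × List Int) (i : Int) : List Int × List Int :=
  if PySem.Int.mod i 2 ≠ 0 then (acc.1 ++ [i], acc.2) else (acc.1, acc.2 ++ [i])

def q5 (integer : Int) (limit : Int) : List Int :=
  let x := PySem.List.pyRange 0 (limit + 1) integer
  (x.foldl q5Step ([], [])).2

-- ===== PORT B =====
def q5_alt (integer : Int) (limit : Int) : List Int :=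
  let step := if PySem.Int.mod integer 2 = 0 then integer else 2 * integer
  PySem.List.pyRange 0 (limit + 1) step

-- ===== PRECONDITION & SPEC =====
-- Pre_ excludes only integer = 0, where Python's range(0, limit+1, 0) raises ValueError
-- (in both A and B).
def Pre_q5 (integer : Int) (limit : Int) : Prop := integer ≠ 0
instance (integer : Int) (limit : Int) : Decidable (Pre_q5 integer limit) := by unfold Pre_q5; infer_instance
def pvWitness_q5 : Int × Int := (3, 30)
def Spec_q5 (integer : Int) (limit : Int) (out : List Int) : Prop := out = q5_alt integer limit
instance (integer : Int) (limit : Int) (out : List Int) : Decidable (Spec_q5 integer limit out) := by unfold Spec_q5; infer_instance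

-- ===== CLAIM (what is proved, stated in full; the proofs are below) =====
def Claim_equal_q5 : Prop := ∀ (integer : Int) (limit : Int), Dom_q5 integer limit → Pre_q5 integer limit → Spec_q5 integer limit (q5 integer limit)

-- ===== LEMMAS AND PROOFS =====

-- Python's i % 2 == 0 is evenness.
theorem pvMod2_iff (x : Int) : PySem.Int.mod x 2 = 0 ↔ 2 ∣ x := by
  simp only [PySem.Int.mod, Int.fmod_eq_emod]
  norm_num

theorem q5Step_even {i : Int} (h : PySem.Int.mod i 2 = 0) (acc : List Int × List Int) :
    q5Step acc i = (acc.1, acc.2 ++ [i]) := by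
  unfold q5Step; rw [if_neg (not_not_intro h)]

theorem q5Step_odd {i : Int} (h : PySem.Int.mod i 2 ≠ 0) (acc : List Int × List Int) :
    q5Step acc i = (acc.1 ++ [i], acc.2) := by
  unfold q5Step; rw [if_pos h]

-- A's two-accumulator loop keeps, in its second component, exactly the even elements in order.
theorem q5_foldl_eq_filter (xs : List Int) (no new : List Int) :
    (xs.foldl q5Step (no, new)).2 = new ++ xs.filter (fun i => decide (PySem.Int.mod i 2 = 0)) := by
  induction xs generalizing no new with
  | nil => simp
  | cons a t ih =>
      rw [List.foldl_cons, List.filter_cons]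
      by_cases h : PySem.Int.mod a 2 = 0
      · rw [q5Step_even h, ih]
        simp [(pvMod2_iff a).mp h]
      · rw [q5Step_odd h, ih]
        have h2 : ¬ 2 ∣ a := fun d => h ((pvMod2_iff a).mpr d)
        simp [h2]

-- two strictly (a)symmetrically ordered lists with the same members are equal
theorem pvEq_of_strict {r : Int → Int → Prop} (hasym : ∀ a b : Int, r a b → ¬ r b a)
    (l₁ l₂ : List Int) (h₁ : l₁.Pairwise r) (h₂ : l₂.Pairwise r)
    (hmem : ∀ x, x ∈ l₁ ↔ x ∈ l₂) : l₁ = l₂ := by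
  have nd₁ : l₁.Nodup := h₁.imp (fun {a b} h => by intro he; exact hasym a b h (he ▸ h))
  have nd₂ : l₂.Nodup := h₂.imp (fun {a b} h => by intro he; exact hasym a b h (he ▸ h))
  have hp : l₁.Perm l₂ := (List.perm_ext_iff_of_nodup nd₁ nd₂).mpr hmem
  exact hp.eq_of_pairwise (fun a b _ _ hab hba => absurd hba (hasym a b hab)) h₁ h₂

theorem pvPairwise_pyRange_pos {s : Int} (hs : 0 < s) (a b : Int) :
    (PySem.List.pyRange a b s).Pairwise (· < ·) := by
  rw [PySem.List.pyRange_of_pos a b hs, List.pairwise_map]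
  exact List.pairwise_lt_range.imp (fun {k k'} h => by
    have : (k : Int) < (k' : Int) := by exact_mod_cast h
    nlinarith)

theorem pvPairwise_pyRange_neg {s : Int} (hs : s < 0) (a b : Int) :
    (PySem.List.pyRange a b s).Pairwise (· > ·) := by
  rw [PySem.List.pyRange_of_neg a b hs, List.pairwise_map]
  exact List.pairwise_lt_range.imp (fun {k k'} h => by
    have : (k : Int) < (k' : Int) := by exact_mod_cast h
    simp only [gt_iff_lt]
    nlinarith)

-- for odd s, an element is even and a multiple of s iff it is a multiple of 2*s
theorem pvOdd_dvd {s x : Int} (hodd : ¬ 2 ∣ s) : (s ∣ x ∧ 2 ∣ x) ↔ 2 * s ∣ x := by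
  constructor
  · rintro ⟨hsx, h2x⟩
    exact IsCoprime.mul_dvd ((Int.prime_two.coprime_iff_not_dvd).mpr hodd) h2x hsx
  · intro h
    exact ⟨(dvd_mul_left s 2).trans h, (dvd_mul_right 2 s).trans h⟩

-- q5 as a filter of the range
theorem q5_eq_filter (integer limit : Int) :
    q5 integer limit =
      (PySem.List.pyRange 0 (limit + 1) integer).filter
        (fun i => decide (PySem.Int.mod i 2 = 0)) := by
  simp [q5, q5_foldl_eq_filter]

-- ===== VERDICT (by name: the statement is the Claim_ definition above) =====
theorem q5_spec : Claim_equal_q5 := by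
  intro integer limit _ hpre
  unfold Spec_q5 q5_alt
  rw [q5_eq_filter]
  by_cases heven : PySem.Int.mod integer 2 = 0
  · -- even stride: every multiple is even, the filter keeps everything
    rw [if_pos heven, List.filter_eq_self]
    intro x hx
    have h2i : 2 ∣ integer := (pvMod2_iff integer).mp heven
    have hdvd : integer ∣ x := by
      rcases lt_trichotomy integer 0 with h | h | h
      · have := ((PySem.List.mem_pyRange_iff_of_neg h x).mp hx).2.2
        simpa using this
      · exact absurd h hpre
      · have := ((PySem.List.mem_pyRange_iff_of_pos h x).mp hx).2.2
        simpa using this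
    simpa using (pvMod2_iff x).mpr (h2i.trans hdvd)
  · -- odd stride: the even multiples of `integer` are exactly the multiples of 2*integer
    rw [if_neg heven]
    have hodd : ¬ 2 ∣ integer := fun h => heven ((pvMod2_iff integer).mpr h)
    rcases lt_trichotomy integer 0 with h | h | h
    · refine pvEq_of_strict (r := (· > ·)) (fun a b h1 h2 => absurd h2 (asymm h1)) _ _
        ((pvPairwise_pyRange_neg h 0 (limit+1)).filter _)
        (pvPairwise_pyRange_neg (by linarith) 0 (limit+1)) ?_
      intro x
      rw [List.mem_filter, PySem.List.mem_pyRange_iff_of_neg h x,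
        PySem.List.mem_pyRange_iff_of_neg (show 2 * integer < 0 by linarith) x]
      simp only [sub_zero, decide_eq_true_eq, pvMod2_iff]
      constructor
      · rintro ⟨⟨ha, hb, hc⟩, hd⟩; exact ⟨ha, hb, (pvOdd_dvd hodd).mp ⟨hc, hd⟩⟩
      · rintro ⟨ha, hb, hc⟩
        have := (pvOdd_dvd hodd).mpr hc
        exact ⟨⟨ha, hb, this.1⟩, this.2⟩
    · exact absurd h hpre
    · refine pvEq_of_strict (r := (· < ·)) (fun a b h1 h2 => absurd h2 (asymm h1)) _ _
        ((pvPairwise_pyRange_pos h 0 (limit+1)).filter _)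
        (pvPairwise_pyRange_pos (by linarith) 0 (limit+1)) ?_
      intro x
      rw [List.mem_filter, PySem.List.mem_pyRange_iff_of_pos h x,
        PySem.List.mem_pyRange_iff_of_pos (show (0:Int) < 2 * integer by linarith) x]
      simp only [sub_zero, decide_eq_true_eq, pvMod2_iff]
      constructor
      · rintro ⟨⟨ha, hb, hc⟩, hd⟩; exact ⟨ha, hb, (pvOdd_dvd hodd).mp ⟨hc, hd⟩⟩
      · rintro ⟨ha, hb, hc⟩
        have := (pvOdd_dvd hodd).mpr hc
        exact ⟨⟨ha, hb, this.1⟩, this.2⟩
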